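-- pv_equiv track=rewrite | github.com/Mind-Dragon/harnessoptimizer | src/hermesoptimizer/tool_surface/chain.py | _parse_chain
-- ===== SOURCE A (Python) =====
-- from typing import Optional
--
-- PIPE = "|"
--
-- AND = "&&"
--
-- OR = "||"
--
-- SEMICOLON = ";"
--
-- def _parse_chain(command_line: str) -> list[tuple[str, Optional[str]]]:
--     """Parse a command line into commands and their joining operators.
--
--     Args:
--         command_line: Command string potentially containing operators
--
--     Returns:
--         List of (command, operator) tuples.
--         The operator is the joining operator AFTER this command (None if last).
--     """
--     # Split on operators while preserving them
--     parts = []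
--     current = ""
--
--     i = 0
--     while i < len(command_line):
--         # Check for operators at current position
--         if command_line[i:i+2] in (AND, OR):
--             # Push current with this operator
--             if current.strip():
--                 parts.append((current.strip(), AND if command_line[i:i+2] == AND else OR))
--             current = ""
--             i += 2
--         elif command_line[i] == PIPE:
--             if current.strip():
--                 parts.append((current.strip(), PIPE))
--             current = ""
--             i += 1
--         elif command_line[i] == SEMICOLON:
--             if current.strip():
--                 parts.append((current.strip(), SEMICOLON))
--             current = ""
--             i += 1
--         else:
--             current += command_line[i]
--             i += 1
--
--     # Don't forget the last part - no operator after it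
--     if current.strip():
--         parts.append((current.strip(), None))
--
--     return parts
-- ===== SOURCE B (Python) =====
-- def _parse_chain(command_line):
--     """Parse a command line into (command, joining-operator) tuples.
--
--     Instead of scanning character by character, repeatedly locate the
--     earliest operator occurrence with str.find (operators listed so that
--     at a tie '||' beats '|'), cut the segment before it, and continue on
--     the remainder.
--     """
--     parts = []
--     rest = command_line
--     while True:
--         best = None
--         for op in ("&&", "||", ";", "|"):
--             idx = rest.find(op)
--             if idx != -1 and (best is None or idx < best[0]):
--                 best = (idx, op)
--         if best is None:
--             break
--         idx, op = best
--         seg = rest[:idx]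
--         if seg.strip():
--             parts.append((seg.strip(), op))
--         rest = rest[idx + len(op):]
--     if rest.strip():
--         parts.append((rest.strip(), None))
--     return parts
-- ===== Notes on version B (the rewrite author's own statement) =====
-- stated objective: faster
-- what changed: Replaces A's character-by-character scan that builds each segment by repeated string concatenation with a segment-at-a-time loop that jumps to the earliest operator occurrence via str.find (tuple order makes '||' beat '|' at a tie) and slices the segment off in one step.
import Mathlib
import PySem

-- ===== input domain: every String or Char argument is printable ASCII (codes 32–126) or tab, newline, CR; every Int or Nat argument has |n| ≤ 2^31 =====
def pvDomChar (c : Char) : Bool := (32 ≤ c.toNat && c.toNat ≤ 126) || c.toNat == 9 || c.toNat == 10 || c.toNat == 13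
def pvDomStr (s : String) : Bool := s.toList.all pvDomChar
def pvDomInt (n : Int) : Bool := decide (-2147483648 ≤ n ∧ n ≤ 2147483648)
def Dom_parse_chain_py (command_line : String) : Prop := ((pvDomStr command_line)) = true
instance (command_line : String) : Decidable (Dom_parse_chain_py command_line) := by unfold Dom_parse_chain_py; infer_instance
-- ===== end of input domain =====

-- B replaces A's character-by-character scan (accumulator `current`, rebuilt by string
-- concatenation per character) with a segment-at-a-time loop that jumps to the earliest
-- operator occurrence via str.find and slices the segment off; same results, measured faster.


-- ===== PORT A =====
-- A's while-loop over the index i, transliterated as recursion on the not-yet-read suffix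
-- `rest` (= command_line[i:]); `cur` is A's `current`, `parts` the accumulator.
def parseChainGoA (parts : List (String × Option String)) (cur rest : List Char) :
    List (String × Option String) :=
  match rest with
  | [] =>
      if PySem.Chars.strip cur ≠ [] then
        parts ++ [(String.ofList (PySem.Chars.strip cur), none)]
      else parts
  | c :: r =>
      if (c :: r).take 2 = ['&', '&'] ∨ (c :: r).take 2 = ['|', '|'] then
        parseChainGoA
          (if PySem.Chars.strip cur ≠ [] then
            parts ++ [(String.ofList (PySem.Chars.strip cur),
              some (if (c :: r).take 2 = ['&', '&'] then "&&" else "||"))]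
          else parts) [] ((c :: r).drop 2)
      else if c = '|' then
        parseChainGoA
          (if PySem.Chars.strip cur ≠ [] then
            parts ++ [(String.ofList (PySem.Chars.strip cur), some "|")]
          else parts) [] r
      else if c = ';' then
        parseChainGoA
          (if PySem.Chars.strip cur ≠ [] then
            parts ++ [(String.ofList (PySem.Chars.strip cur), some ";")]
          else parts) [] r
      else
        parseChainGoA parts (cur ++ [c]) r
termination_by rest.length
decreasing_by
  all_goals simp

def parse_chain_py (command_line : String) : List (String × Option String) :=
  parseChainGoA [] [] command_line.toList

-- ===== PORT B =====
-- the operator tuple ("&&", "||", ";", "|") of Source B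
def pvOps : List (List Char) := [['&', '&'], ['|', '|'], [';'], ['|']]

-- Source B's inner `for op in …` loop picking the earliest-found operator (first in tuple order wins a tie)
def pvBest (rest : List Char) : Option (Int × List Char) :=
  pvOps.foldl
    (fun best op =>
      match best with
      | none =>
          if PySem.Chars.find rest op = -1 then none
          else some (PySem.Chars.find rest op, op)
      | some b =>
          if PySem.Chars.find rest op ≠ -1 ∧ PySem.Chars.find rest op < b.1 then
            some (PySem.Chars.find rest op, op)
          else best)
    none

lemma find_len_facts (cs op : List Char) (h : ¬ PySem.Chars.find cs op = -1) :
    0 ≤ PySem.Chars.find cs op ∧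
      (PySem.Chars.find cs op).toNat + op.length ≤ cs.length := by
  have h0 : 0 ≤ PySem.Chars.find cs op := by
    have := PySem.Chars.neg_one_le_find (s := cs) (sub := op)
    omega
  obtain ⟨h1, -⟩ := PySem.Chars.find_spec (s := cs) (sub := op) h0
  have hl := h1.length_le
  simp [List.length_drop] at hl
  have := PySem.Chars.find_le_length (s := cs) (sub := op)
  exact ⟨h0, by omega⟩

lemma pvBest_fold_inv (rest : List Char) (ops : List (List Char))
    (acc : Option (Int × List Char))
    (hops : ∀ op ∈ ops, 1 ≤ op.length)
    (hacc : ∀ i op, acc = some (i, op) →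
      ¬ PySem.Chars.find rest op = -1 ∧ i = PySem.Chars.find rest op ∧ 1 ≤ op.length) :
    ∀ i op,
      ops.foldl
        (fun best op =>
          match best with
          | none =>
              if PySem.Chars.find rest op = -1 then none
              else some (PySem.Chars.find rest op, op)
          | some b =>
              if PySem.Chars.find rest op ≠ -1 ∧ PySem.Chars.find rest op < b.1 then
                some (PySem.Chars.find rest op, op)
              else best)
        acc = some (i, op) →
      ¬ PySem.Chars.find rest op = -1 ∧ i = PySem.Chars.find rest op ∧ 1 ≤ op.length := by
  induction ops generalizing acc with
  | nil => simpa using hacc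
  | cons o os ih =>
      intro i op h
      refine ih _ (fun p hp => hops p (List.mem_cons_of_mem _ hp)) ?_ i op h
      intro i' op' hstep
      rcases hacc2 : acc with - | ⟨bi, bo⟩
      · simp only [hacc2] at hstep
        split_ifs at hstep with hc
        simp only [Option.some.injEq, Prod.mk.injEq] at hstep
        obtain ⟨h1, h2⟩ := hstep
        subst h2
        exact ⟨hc, h1.symm, hops o (by simp)⟩
      · simp only [hacc2] at hstep
        split_ifs at hstep with hc
        · simp only [Option.some.injEq, Prod.mk.injEq] at hstep
          obtain ⟨h1, h2⟩ := hstep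
          subst h2
          exact ⟨hc.1, h1.symm, hops o (by simp)⟩
        · simp only [Option.some.injEq, Prod.mk.injEq] at hstep
          obtain ⟨h1, h2⟩ := hstep
          subst h1; subst h2
          exact hacc _ _ hacc2

lemma pvBest_some_facts (rest : List Char) (idx : Int) (op : List Char)
    (h : pvBest rest = some (idx, op)) :
    0 ≤ idx ∧ 1 ≤ op.length ∧ idx.toNat + op.length ≤ rest.length := by
  unfold pvBest pvOps at h
  obtain ⟨hne, hidx, hlen⟩ :=
    pvBest_fold_inv rest [['&', '&'], ['|', '|'], [';'], ['|']] none
      (by intro o ho; fin_cases ho <;> simp) (by simp) idx op h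
  subst hidx
  obtain ⟨h0, hb⟩ := find_len_facts rest op hne
  exact ⟨h0, hlen, hb⟩

-- Source B's `while True` loop: cut the segment before the earliest operator, recurse on the remainder
def parseChainGoB (parts : List (String × Option String)) (rest : List Char) :
    List (String × Option String) :=
  match h : pvBest rest with
  | none =>
      if PySem.Chars.strip rest ≠ [] then
        parts ++ [(String.ofList (PySem.Chars.strip rest), none)]
      else parts
  | some (idx, op) =>
      parseChainGoB
        (if PySem.Chars.strip (PySem.List.slice rest none (some idx)) ≠ [] then
          parts ++ [(String.ofList (PySem.Chars.strip (PySem.List.slice rest none (some idx))),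
            some (String.ofList op))]
        else parts)
        (PySem.List.slice rest (some (idx + op.length)) none)
termination_by rest.length
decreasing_by
  have hf := pvBest_some_facts rest idx op h
  rw [PySem.List.slice_from _ (by omega : (0:Int) ≤ idx + op.length)]
  simp
  omega

def parse_chain_py_alt (command_line : String) : List (String × Option String) :=
  parseChainGoB [] command_line.toList

-- ===== PRECONDITION & SPEC =====
def Spec_parse_chain_py (command_line : String) (out : List (String × Option String)) : Prop := out = parse_chain_py_alt command_line
instance (command_line : String) (out : List (String × Option String)) : Decidable (Spec_parse_chain_py command_line out) := by unfold Spec_parse_chain_py; infer_instance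

-- ===== CLAIM (what is proved, stated in full; the proofs are below) =====
def Claim_equal_parse_chain_py : Prop := ∀ (command_line : String), Dom_parse_chain_py command_line → Spec_parse_chain_py command_line (parse_chain_py command_line)

-- ===== LEMMAS AND PROOFS =====

-- A's invariant: every operator occurrence in cur ++ rest starts inside rest
def pvInv (cur rest : List Char) : Prop :=
  ∀ op ∈ pvOps, ∀ j < cur.length, ¬ op <+: (cur ++ rest).drop j

lemma find_eq_of_first (cs op : List Char) (i : Nat) (_hop : op ≠ [])
    (hocc : op <+: cs.drop i) (hmin : ∀ j < i, ¬ op <+: cs.drop j) :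
    PySem.Chars.find cs op = (i : Int) := by
  have hinf : op <:+: cs := by
    rw [← PySem.Chars.isIn_iff_infix, ← PySem.Chars.exists_prefix_drop_iff_isIn]
    exact ⟨i, hocc⟩
  have h0 : 0 ≤ PySem.Chars.find cs op := (PySem.Chars.find_nonneg_iff cs op).2 hinf
  obtain ⟨h1, h2⟩ := PySem.Chars.find_spec (s := cs) (sub := op) h0
  have : (PySem.Chars.find cs op).toNat = i := by
    rcases Nat.lt_trichotomy (PySem.Chars.find cs op).toNat i with h | h | h
    · exact absurd h1 (hmin _ h)
    · exact h
    · exact absurd hocc (h2 i h)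
  omega

lemma find_eq_neg_one_of_none (cs op : List Char) (h : ∀ j, ¬ op <+: cs.drop j) :
    PySem.Chars.find cs op = -1 := by
  rw [PySem.Chars.find_eq_neg_one_iff]
  intro hinf
  rw [← PySem.Chars.isIn_iff_infix, ← PySem.Chars.exists_prefix_drop_iff_isIn] at hinf
  obtain ⟨j, hj⟩ := hinf
  exact h j hj

lemma find_gt_of_min (cs op : List Char) (i : Nat) (hmin : ∀ j ≤ i, ¬ op <+: cs.drop j) :
    PySem.Chars.find cs op = -1 ∨ (i : Int) < PySem.Chars.find cs op := by
  by_cases h : PySem.Chars.find cs op = -1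
  · exact Or.inl h
  · right
    have h0 : 0 ≤ PySem.Chars.find cs op := by
      have := PySem.Chars.neg_one_le_find (s := cs) (sub := op)
      omega
    obtain ⟨h1, h2⟩ := PySem.Chars.find_spec (s := cs) (sub := op) h0
    by_contra hle
    exact hmin _ (by omega) h1

lemma pvBest_amp (cs : List Char) (i : Nat)
    (h1 : PySem.Chars.find cs ['&','&'] = (i:Int))
    (h2 : PySem.Chars.find cs ['|','|'] = -1 ∨ (i:Int) < PySem.Chars.find cs ['|','|'])
    (h3 : PySem.Chars.find cs [';'] = -1 ∨ (i:Int) < PySem.Chars.find cs [';'])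
    (h4 : PySem.Chars.find cs ['|'] = -1 ∨ (i:Int) < PySem.Chars.find cs ['|'])
    : pvBest cs = some ((i:Int), ['&','&']) := by
  have hi : ¬ ((i:Int) = -1) := by omega
  have hself : ¬ ((i:Int) ≠ -1 ∧ (i:Int) < (i:Int)) := by omega
  unfold pvBest pvOps
  simp only [List.foldl, h1]
  rcases h2 with h2|h2 <;> rcases h3 with h3|h3 <;> rcases h4 with h4|h4
  · simp [h1, h2, h3, h4, hi, hself]
  · have ne4 : ¬ PySem.Chars.find cs ['|'] = -1 := by omega
    have nlt4 : ¬ PySem.Chars.find cs ['|'] < (i:Int) := by omega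
    have nle4 : (i:Int) ≤ PySem.Chars.find cs ['|'] := by omega
    simp [h1, h2, h3, h4, hi, hself, ne4, nlt4, nle4]
  · have ne3 : ¬ PySem.Chars.find cs [';'] = -1 := by omega
    have nlt3 : ¬ PySem.Chars.find cs [';'] < (i:Int) := by omega
    have nle3 : (i:Int) ≤ PySem.Chars.find cs [';'] := by omega
    simp [h1, h2, h3, h4, hi, hself, ne3, nlt3, nle3]
  · have ne3 : ¬ PySem.Chars.find cs [';'] = -1 := by omega
    have nlt3 : ¬ PySem.Chars.find cs [';'] < (i:Int) := by omega
    have nle3 : (i:Int) ≤ PySem.Chars.find cs [';'] := by omega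
    have ne4 : ¬ PySem.Chars.find cs ['|'] = -1 := by omega
    have nlt4 : ¬ PySem.Chars.find cs ['|'] < (i:Int) := by omega
    have nle4 : (i:Int) ≤ PySem.Chars.find cs ['|'] := by omega
    simp [h1, h2, h3, h4, hi, hself, ne3, nlt3, nle3, ne4, nlt4, nle4]
  · have ne2 : ¬ PySem.Chars.find cs ['|','|'] = -1 := by omega
    have nlt2 : ¬ PySem.Chars.find cs ['|','|'] < (i:Int) := by omega
    have nle2 : (i:Int) ≤ PySem.Chars.find cs ['|','|'] := by omega
    simp [h1, h2, h3, h4, hi, hself, ne2, nlt2, nle2]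
  · have ne2 : ¬ PySem.Chars.find cs ['|','|'] = -1 := by omega
    have nlt2 : ¬ PySem.Chars.find cs ['|','|'] < (i:Int) := by omega
    have nle2 : (i:Int) ≤ PySem.Chars.find cs ['|','|'] := by omega
    have ne4 : ¬ PySem.Chars.find cs ['|'] = -1 := by omega
    have nlt4 : ¬ PySem.Chars.find cs ['|'] < (i:Int) := by omega
    have nle4 : (i:Int) ≤ PySem.Chars.find cs ['|'] := by omega
    simp [h1, h2, h3, h4, hi, hself, ne2, nlt2, nle2, ne4, nlt4, nle4]
  · have ne2 : ¬ PySem.Chars.find cs ['|','|'] = -1 := by omega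
    have nlt2 : ¬ PySem.Chars.find cs ['|','|'] < (i:Int) := by omega
    have nle2 : (i:Int) ≤ PySem.Chars.find cs ['|','|'] := by omega
    have ne3 : ¬ PySem.Chars.find cs [';'] = -1 := by omega
    have nlt3 : ¬ PySem.Chars.find cs [';'] < (i:Int) := by omega
    have nle3 : (i:Int) ≤ PySem.Chars.find cs [';'] := by omega
    simp [h1, h2, h3, h4, hi, hself, ne2, nlt2, nle2, ne3, nlt3, nle3]
  · have ne2 : ¬ PySem.Chars.find cs ['|','|'] = -1 := by omega
    have nlt2 : ¬ PySem.Chars.find cs ['|','|'] < (i:Int) := by omega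
    have nle2 : (i:Int) ≤ PySem.Chars.find cs ['|','|'] := by omega
    have ne3 : ¬ PySem.Chars.find cs [';'] = -1 := by omega
    have nlt3 : ¬ PySem.Chars.find cs [';'] < (i:Int) := by omega
    have nle3 : (i:Int) ≤ PySem.Chars.find cs [';'] := by omega
    have ne4 : ¬ PySem.Chars.find cs ['|'] = -1 := by omega
    have nlt4 : ¬ PySem.Chars.find cs ['|'] < (i:Int) := by omega
    have nle4 : (i:Int) ≤ PySem.Chars.find cs ['|'] := by omega
    simp [h1, h2, h3, h4, hi, hself, ne2, nlt2, nle2, ne3, nlt3, nle3, ne4, nlt4, nle4]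

lemma pvBest_pipe2 (cs : List Char) (i : Nat)
    (h1 : PySem.Chars.find cs ['&','&'] = -1 ∨ (i:Int) < PySem.Chars.find cs ['&','&'])
    (h2 : PySem.Chars.find cs ['|','|'] = (i:Int))
    (h3 : PySem.Chars.find cs [';'] = -1 ∨ (i:Int) < PySem.Chars.find cs [';'])
    (h4 : PySem.Chars.find cs ['|'] = (i:Int))
    : pvBest cs = some ((i:Int), ['|','|']) := by
  have hi : ¬ ((i:Int) = -1) := by omega
  have hself : ¬ ((i:Int) ≠ -1 ∧ (i:Int) < (i:Int)) := by omega
  unfold pvBest pvOps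
  simp only [List.foldl, h2, h4]
  rcases h1 with h1|h1 <;> rcases h3 with h3|h3
  · simp [h1, h2, h3, h4, hi, hself]
  · have ne3 : ¬ PySem.Chars.find cs [';'] = -1 := by omega
    have nlt3 : ¬ PySem.Chars.find cs [';'] < (i:Int) := by omega
    have nle3 : (i:Int) ≤ PySem.Chars.find cs [';'] := by omega
    simp [h1, h2, h3, h4, hi, hself, ne3, nlt3, nle3]
  · have ne1 : ¬ PySem.Chars.find cs ['&','&'] = -1 := by omega
    have nlt1 : ¬ PySem.Chars.find cs ['&','&'] < (i:Int) := by omega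
    have nle1 : (i:Int) ≤ PySem.Chars.find cs ['&','&'] := by omega
    simp [h1, h2, h3, h4, hi, hself, ne1, nlt1, nle1]
  · have ne1 : ¬ PySem.Chars.find cs ['&','&'] = -1 := by omega
    have nlt1 : ¬ PySem.Chars.find cs ['&','&'] < (i:Int) := by omega
    have nle1 : (i:Int) ≤ PySem.Chars.find cs ['&','&'] := by omega
    have ne3 : ¬ PySem.Chars.find cs [';'] = -1 := by omega
    have nlt3 : ¬ PySem.Chars.find cs [';'] < (i:Int) := by omega
    have nle3 : (i:Int) ≤ PySem.Chars.find cs [';'] := by omega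
    simp [h1, h2, h3, h4, hi, hself, ne1, nlt1, nle1, ne3, nlt3, nle3]

lemma pvBest_semi (cs : List Char) (i : Nat)
    (h1 : PySem.Chars.find cs ['&','&'] = -1 ∨ (i:Int) < PySem.Chars.find cs ['&','&'])
    (h2 : PySem.Chars.find cs ['|','|'] = -1 ∨ (i:Int) < PySem.Chars.find cs ['|','|'])
    (h3 : PySem.Chars.find cs [';'] = (i:Int))
    (h4 : PySem.Chars.find cs ['|'] = -1 ∨ (i:Int) < PySem.Chars.find cs ['|'])
    : pvBest cs = some ((i:Int), [';']) := by
  have hi : ¬ ((i:Int) = -1) := by omega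
  have hself : ¬ ((i:Int) ≠ -1 ∧ (i:Int) < (i:Int)) := by omega
  unfold pvBest pvOps
  simp only [List.foldl, h3]
  rcases h1 with h1|h1 <;> rcases h2 with h2|h2 <;> rcases h4 with h4|h4
  · simp [h1, h2, h3, h4, hi, hself]
  · have ne4 : ¬ PySem.Chars.find cs ['|'] = -1 := by omega
    have nlt4 : ¬ PySem.Chars.find cs ['|'] < (i:Int) := by omega
    have nle4 : (i:Int) ≤ PySem.Chars.find cs ['|'] := by omega
    simp [h1, h2, h3, h4, hi, hself, ne4, nlt4, nle4]
  · have ne2 : ¬ PySem.Chars.find cs ['|','|'] = -1 := by omega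
    have nlt2 : ¬ PySem.Chars.find cs ['|','|'] < (i:Int) := by omega
    have nle2 : (i:Int) ≤ PySem.Chars.find cs ['|','|'] := by omega
    simp [h1, h2, h3, h4, hi, hself, ne2, nlt2, nle2]
  · have ne2 : ¬ PySem.Chars.find cs ['|','|'] = -1 := by omega
    have nlt2 : ¬ PySem.Chars.find cs ['|','|'] < (i:Int) := by omega
    have nle2 : (i:Int) ≤ PySem.Chars.find cs ['|','|'] := by omega
    have ne4 : ¬ PySem.Chars.find cs ['|'] = -1 := by omega
    have nlt4 : ¬ PySem.Chars.find cs ['|'] < (i:Int) := by omega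
    have nle4 : (i:Int) ≤ PySem.Chars.find cs ['|'] := by omega
    simp [h1, h2, h3, h4, hi, hself, ne2, nlt2, nle2, ne4, nlt4, nle4]
  · have ne1 : ¬ PySem.Chars.find cs ['&','&'] = -1 := by omega
    have nlt1 : ¬ PySem.Chars.find cs ['&','&'] < (i:Int) := by omega
    have nle1 : (i:Int) ≤ PySem.Chars.find cs ['&','&'] := by omega
    simp [h1, h2, h3, h4, hi, hself, ne1, nlt1, nle1]
  · have ne1 : ¬ PySem.Chars.find cs ['&','&'] = -1 := by omega
    have nlt1 : ¬ PySem.Chars.find cs ['&','&'] < (i:Int) := by omega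
    have nle1 : (i:Int) ≤ PySem.Chars.find cs ['&','&'] := by omega
    have ne4 : ¬ PySem.Chars.find cs ['|'] = -1 := by omega
    have nlt4 : ¬ PySem.Chars.find cs ['|'] < (i:Int) := by omega
    have nle4 : (i:Int) ≤ PySem.Chars.find cs ['|'] := by omega
    simp [h1, h2, h3, h4, hi, hself, ne1, nlt1, nle1, ne4, nlt4, nle4]
  · have ne1 : ¬ PySem.Chars.find cs ['&','&'] = -1 := by omega
    have nlt1 : ¬ PySem.Chars.find cs ['&','&'] < (i:Int) := by omega
    have nle1 : (i:Int) ≤ PySem.Chars.find cs ['&','&'] := by omega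
    have ne2 : ¬ PySem.Chars.find cs ['|','|'] = -1 := by omega
    have nlt2 : ¬ PySem.Chars.find cs ['|','|'] < (i:Int) := by omega
    have nle2 : (i:Int) ≤ PySem.Chars.find cs ['|','|'] := by omega
    simp [h1, h2, h3, h4, hi, hself, ne1, nlt1, nle1, ne2, nlt2, nle2]
    all_goals (split_ifs <;> simp [h1, h2, h3, h4, hi, hself, ne1, nlt1, nle1, ne2, nlt2, nle2])
  · have ne1 : ¬ PySem.Chars.find cs ['&','&'] = -1 := by omega
    have nlt1 : ¬ PySem.Chars.find cs ['&','&'] < (i:Int) := by omega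
    have nle1 : (i:Int) ≤ PySem.Chars.find cs ['&','&'] := by omega
    have ne2 : ¬ PySem.Chars.find cs ['|','|'] = -1 := by omega
    have nlt2 : ¬ PySem.Chars.find cs ['|','|'] < (i:Int) := by omega
    have nle2 : (i:Int) ≤ PySem.Chars.find cs ['|','|'] := by omega
    have ne4 : ¬ PySem.Chars.find cs ['|'] = -1 := by omega
    have nlt4 : ¬ PySem.Chars.find cs ['|'] < (i:Int) := by omega
    have nle4 : (i:Int) ≤ PySem.Chars.find cs ['|'] := by omega
    simp [h1, h2, h3, h4, hi, hself, ne1, nlt1, nle1, ne2, nlt2, nle2, ne4, nlt4, nle4]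
    all_goals (split_ifs <;> simp [h1, h2, h3, h4, hi, hself, ne1, nlt1, nle1, ne2, nlt2, nle2, ne4, nlt4, nle4])

lemma pvBest_pipe1 (cs : List Char) (i : Nat)
    (h1 : PySem.Chars.find cs ['&','&'] = -1 ∨ (i:Int) < PySem.Chars.find cs ['&','&'])
    (h2 : PySem.Chars.find cs ['|','|'] = -1 ∨ (i:Int) < PySem.Chars.find cs ['|','|'])
    (h3 : PySem.Chars.find cs [';'] = -1 ∨ (i:Int) < PySem.Chars.find cs [';'])
    (h4 : PySem.Chars.find cs ['|'] = (i:Int))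
    : pvBest cs = some ((i:Int), ['|']) := by
  have hi : ¬ ((i:Int) = -1) := by omega
  have hself : ¬ ((i:Int) ≠ -1 ∧ (i:Int) < (i:Int)) := by omega
  unfold pvBest pvOps
  simp only [List.foldl, h4]
  rcases h1 with h1|h1 <;> rcases h2 with h2|h2 <;> rcases h3 with h3|h3
  · simp [h1, h2, h3, h4, hi, hself]
  · have ne3 : ¬ PySem.Chars.find cs [';'] = -1 := by omega
    have nlt3 : ¬ PySem.Chars.find cs [';'] < (i:Int) := by omega
    have nle3 : (i:Int) ≤ PySem.Chars.find cs [';'] := by omega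
    simp [h1, h2, h3, h4, hi, hself, ne3, nlt3, nle3]
  · have ne2 : ¬ PySem.Chars.find cs ['|','|'] = -1 := by omega
    have nlt2 : ¬ PySem.Chars.find cs ['|','|'] < (i:Int) := by omega
    have nle2 : (i:Int) ≤ PySem.Chars.find cs ['|','|'] := by omega
    simp [h1, h2, h3, h4, hi, hself, ne2, nlt2, nle2]
  · have ne2 : ¬ PySem.Chars.find cs ['|','|'] = -1 := by omega
    have nlt2 : ¬ PySem.Chars.find cs ['|','|'] < (i:Int) := by omega
    have nle2 : (i:Int) ≤ PySem.Chars.find cs ['|','|'] := by omega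
    have ne3 : ¬ PySem.Chars.find cs [';'] = -1 := by omega
    have nlt3 : ¬ PySem.Chars.find cs [';'] < (i:Int) := by omega
    have nle3 : (i:Int) ≤ PySem.Chars.find cs [';'] := by omega
    simp [h1, h2, h3, h4, hi, hself, ne2, nlt2, nle2, ne3, nlt3, nle3]
    all_goals (split_ifs <;> simp [h1, h2, h3, h4, hi, hself, ne2, nlt2, nle2, ne3, nlt3, nle3])
  · have ne1 : ¬ PySem.Chars.find cs ['&','&'] = -1 := by omega
    have nlt1 : ¬ PySem.Chars.find cs ['&','&'] < (i:Int) := by omega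
    have nle1 : (i:Int) ≤ PySem.Chars.find cs ['&','&'] := by omega
    simp [h1, h2, h3, h4, hi, hself, ne1, nlt1, nle1]
  · have ne1 : ¬ PySem.Chars.find cs ['&','&'] = -1 := by omega
    have nlt1 : ¬ PySem.Chars.find cs ['&','&'] < (i:Int) := by omega
    have nle1 : (i:Int) ≤ PySem.Chars.find cs ['&','&'] := by omega
    have ne3 : ¬ PySem.Chars.find cs [';'] = -1 := by omega
    have nlt3 : ¬ PySem.Chars.find cs [';'] < (i:Int) := by omega
    have nle3 : (i:Int) ≤ PySem.Chars.find cs [';'] := by omega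
    simp [h1, h2, h3, h4, hi, hself, ne1, nlt1, nle1, ne3, nlt3, nle3]
    all_goals (split_ifs <;> simp [h1, h2, h3, h4, hi, hself, ne1, nlt1, nle1, ne3, nlt3, nle3])
  · have ne1 : ¬ PySem.Chars.find cs ['&','&'] = -1 := by omega
    have nlt1 : ¬ PySem.Chars.find cs ['&','&'] < (i:Int) := by omega
    have nle1 : (i:Int) ≤ PySem.Chars.find cs ['&','&'] := by omega
    have ne2 : ¬ PySem.Chars.find cs ['|','|'] = -1 := by omega
    have nlt2 : ¬ PySem.Chars.find cs ['|','|'] < (i:Int) := by omega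
    have nle2 : (i:Int) ≤ PySem.Chars.find cs ['|','|'] := by omega
    simp [h1, h2, h3, h4, hi, hself, ne1, nlt1, nle1, ne2, nlt2, nle2]
    all_goals (split_ifs <;> simp [h1, h2, h3, h4, hi, hself, ne1, nlt1, nle1, ne2, nlt2, nle2])
  · have ne1 : ¬ PySem.Chars.find cs ['&','&'] = -1 := by omega
    have nlt1 : ¬ PySem.Chars.find cs ['&','&'] < (i:Int) := by omega
    have nle1 : (i:Int) ≤ PySem.Chars.find cs ['&','&'] := by omega
    have ne2 : ¬ PySem.Chars.find cs ['|','|'] = -1 := by omega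
    have nlt2 : ¬ PySem.Chars.find cs ['|','|'] < (i:Int) := by omega
    have nle2 : (i:Int) ≤ PySem.Chars.find cs ['|','|'] := by omega
    have ne3 : ¬ PySem.Chars.find cs [';'] = -1 := by omega
    have nlt3 : ¬ PySem.Chars.find cs [';'] < (i:Int) := by omega
    have nle3 : (i:Int) ≤ PySem.Chars.find cs [';'] := by omega
    simp [h1, h2, h3, h4, hi, hself, ne1, nlt1, nle1, ne2, nlt2, nle2, ne3, nlt3, nle3]
    all_goals (split_ifs <;> simp [h1, h2, h3, h4, hi, hself, ne1, nlt1, nle1, ne2, nlt2, nle2, ne3, nlt3, nle3])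
    all_goals (split_ifs <;> simp [h1, h2, h3, h4, hi, hself, ne1, nlt1, nle1, ne2, nlt2, nle2, ne3, nlt3, nle3])

lemma pvBest_none (cs : List Char)
    (h1 : PySem.Chars.find cs ['&','&'] = -1)
    (h2 : PySem.Chars.find cs ['|','|'] = -1)
    (h3 : PySem.Chars.find cs [';'] = -1)
    (h4 : PySem.Chars.find cs ['|'] = -1) :
    pvBest cs = none := by
  unfold pvBest pvOps
  simp [List.foldl, h1, h2, h3, h4]

lemma goB_none (parts : List (String × Option String)) (rest : List Char)
    (h : pvBest rest = none) :
    parseChainGoB parts rest =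
      if PySem.Chars.strip rest ≠ [] then
        parts ++ [(String.ofList (PySem.Chars.strip rest), none)]
      else parts := by
  rw [parseChainGoB.eq_def]
  split <;> simp_all

lemma goB_some (parts : List (String × Option String)) (rest : List Char)
    (idx : Int) (op : List Char) (h : pvBest rest = some (idx, op)) :
    parseChainGoB parts rest =
      parseChainGoB
        (if PySem.Chars.strip (PySem.List.slice rest none (some idx)) ≠ [] then
          parts ++ [(String.ofList (PySem.Chars.strip (PySem.List.slice rest none (some idx))),
            some (String.ofList op))]
        else parts)
        (PySem.List.slice rest (some (idx + op.length)) none) := by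
  conv_lhs => rw [parseChainGoB.eq_def]
  split <;> simp_all

lemma inv_nil (rest : List Char) : pvInv [] rest := by
  intro op _ j hj
  simp at hj

lemma inv_find_nil (cur op : List Char) (hop : op ≠ [])
    (hmin : ∀ j < cur.length, ¬ op <+: cur.drop j) :
    PySem.Chars.find cur op = -1 := by
  apply find_eq_neg_one_of_none
  intro j
  by_cases hj : j < cur.length
  · exact hmin j hj
  · rw [List.drop_eq_nil_of_le (by omega)]
    intro hpre
    exact hop (List.prefix_nil.mp hpre)

lemma inv_find_case (cur rest op : List Char) (hop : op ≠ [])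
    (hmin : ∀ j < cur.length, ¬ op <+: (cur ++ rest).drop j) :
    (op <+: rest → PySem.Chars.find (cur ++ rest) op = (cur.length : Int)) ∧
    (¬ op <+: rest →
      PySem.Chars.find (cur ++ rest) op = -1 ∨
        (cur.length : Int) < PySem.Chars.find (cur ++ rest) op) := by
  have hdrop : (cur ++ rest).drop cur.length = rest := by
    simpa using List.drop_length_add_append 0 cur rest
  constructor
  · intro hocc
    exact find_eq_of_first _ _ _ hop (by rw [hdrop]; exact hocc) hmin
  · intro hnot
    apply find_gt_of_min
    intro j hj
    rcases Nat.lt_or_ge j cur.length with hlt | hge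
    · exact hmin j hlt
    · have : j = cur.length := by omega
      rw [this, hdrop]
      exact hnot

lemma inv_extend (cur : List Char) (c : Char) (r : List Char)
    (hinv : pvInv cur (c :: r))
    (hA : ¬ (c :: r).take 2 = ['&', '&'])
    (hp : ¬ c = '|') (hs : ¬ c = ';') :
    pvInv (cur ++ [c]) r := by
  intro op hop j hj
  have hre : (cur ++ [c]) ++ r = cur ++ (c :: r) := by simp
  rw [hre]
  simp only [List.length_append, List.length_cons, List.length_nil] at hj
  rcases Nat.lt_or_ge j cur.length with hlt | hge
  · exact hinv op hop j hlt
  · have hj' : j = cur.length := by omega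
    subst hj'
    have hdrop : (cur ++ (c :: r)).drop cur.length = c :: r := by
      simpa using List.drop_length_add_append 0 cur (c :: r)
    rw [hdrop]
    fin_cases hop
    · intro hpre
      rw [List.prefix_iff_eq_take] at hpre
      exact hA hpre.symm
    · intro hpre
      rcases List.cons_prefix_cons.mp hpre with ⟨h1, -⟩
      exact hp h1.symm
    · intro hpre
      rcases List.cons_prefix_cons.mp hpre with ⟨h1, -⟩
      exact hs h1.symm
    · intro hpre
      rcases List.cons_prefix_cons.mp hpre with ⟨h1, -⟩
      exact hp h1.symm

lemma main_base (cur : List Char) (parts : List (String × Option String))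
    (hinv : pvInv cur []) :
    parseChainGoA parts cur [] = parseChainGoB parts (cur ++ []) := by
  rw [List.append_nil]
  have hmin : ∀ op ∈ pvOps, ∀ j < cur.length, ¬ op <+: cur.drop j := by
    intro op hop j hj
    have := hinv op hop j hj
    simpa using this
  have hnone : pvBest cur = none :=
    pvBest_none cur
      (inv_find_nil _ _ (by simp) (hmin _ (by simp [pvOps])))
      (inv_find_nil _ _ (by simp) (hmin _ (by simp [pvOps])))
      (inv_find_nil _ _ (by simp) (hmin _ (by simp [pvOps])))
      (inv_find_nil _ _ (by simp) (hmin _ (by simp [pvOps])))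
  rw [goB_none parts cur hnone, parseChainGoA]

theorem parseChain_main (n : Nat) :
    ∀ rest : List Char, rest.length ≤ n → ∀ cur parts, pvInv cur rest →
      parseChainGoA parts cur rest = parseChainGoB parts (cur ++ rest) := by
  induction n with
  | zero =>
      intro rest hlen cur parts hinv
      have h0 : rest = [] := by cases rest <;> simp_all
      subst h0
      exact main_base cur parts hinv
  | succ n ih =>
      intro rest hlen cur parts hinv
      cases rest with
      | nil => exact main_base cur parts hinv
      | cons c r =>
        by_cases hA : (c :: r).take 2 = ['&', '&']
        · -- "&&" case
          cases r with
          | nil => simp at hA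
          | cons c2 r2 =>
            simp only [List.take, List.cons.injEq, and_true] at hA
            obtain ⟨hc, hc2⟩ := hA
            subst hc; subst hc2
            have hmin : ∀ op ∈ pvOps, ∀ j < cur.length,
                ¬ op <+: (cur ++ ('&' :: '&' :: r2)).drop j := hinv
            have hf1 := (inv_find_case cur _ ['&','&'] (by simp) (hmin _ (by simp [pvOps]))).1 ⟨r2, rfl⟩
            have hf2 := (inv_find_case cur _ ['|','|'] (by simp) (hmin _ (by simp [pvOps]))).2 (by simp [List.cons_prefix_cons])
            have hf3 := (inv_find_case cur _ [';'] (by simp) (hmin _ (by simp [pvOps]))).2 (by simp [List.cons_prefix_cons])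
            have hf4 := (inv_find_case cur _ ['|'] (by simp) (hmin _ (by simp [pvOps]))).2 (by simp [List.cons_prefix_cons])
            have hbest := pvBest_amp _ cur.length hf1 hf2 hf3 hf4
            rw [goB_some parts _ _ _ hbest]
            have hseg : PySem.List.slice (cur ++ ('&' :: '&' :: r2)) none
                (some ((cur.length : Nat) : Int)) = cur := by
              rw [PySem.List.slice_to _ (by omega)]
              simp
            have hlen2 : (((cur.length : Nat) : Int) + ((['&','&'] : List Char).length : Int)).toNat
                = cur.length + 2 := by
              simp only [List.length_cons, List.length_nil]
              omega
            have hrest : PySem.List.slice (cur ++ ('&' :: '&' :: r2))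
                (some (((cur.length : Nat) : Int) + ((['&','&'] : List Char).length : Int))) none = r2 := by
              rw [PySem.List.slice_from _ (by omega), hlen2]
              simpa using List.drop_length_add_append 2 cur ('&' :: '&' :: r2)
            simp only [hseg, hrest]
            have hc1 : ('&' :: '&' :: r2).take 2 = ['&', '&'] := rfl
            rw [parseChainGoA, if_pos (Or.inl hc1), if_pos hc1]
            have hpush : (String.ofList ['&','&']) = "&&" := rfl
            simp only [hpush, List.drop_succ_cons, List.drop_zero]
            exact ih r2 (by simp at hlen; omega) [] _ (inv_nil r2)
        by_cases hO : (c :: r).take 2 = ['|', '|']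
        · -- "||" case
          cases r with
          | nil => simp at hO
          | cons c2 r2 =>
            simp only [List.take, List.cons.injEq, and_true] at hO
            obtain ⟨hc, hc2⟩ := hO
            subst hc; subst hc2
            have hmin : ∀ op ∈ pvOps, ∀ j < cur.length,
                ¬ op <+: (cur ++ ('|' :: '|' :: r2)).drop j := hinv
            have hf1 := (inv_find_case cur _ ['&','&'] (by simp) (hmin _ (by simp [pvOps]))).2 (by simp [List.cons_prefix_cons])
            have hf2 := (inv_find_case cur _ ['|','|'] (by simp) (hmin _ (by simp [pvOps]))).1 ⟨r2, rfl⟩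
            have hf3 := (inv_find_case cur _ [';'] (by simp) (hmin _ (by simp [pvOps]))).2 (by simp [List.cons_prefix_cons])
            have hf4 := (inv_find_case cur _ ['|'] (by simp) (hmin _ (by simp [pvOps]))).1 ⟨'|' :: r2, rfl⟩
            have hbest := pvBest_pipe2 _ cur.length hf1 hf2 hf3 hf4
            rw [goB_some parts _ _ _ hbest]
            have hseg : PySem.List.slice (cur ++ ('|' :: '|' :: r2)) none
                (some ((cur.length : Nat) : Int)) = cur := by
              rw [PySem.List.slice_to _ (by omega)]
              simp
            have hlen2 : (((cur.length : Nat) : Int) + ((['|','|'] : List Char).length : Int)).toNat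
                = cur.length + 2 := by
              simp only [List.length_cons, List.length_nil]
              omega
            have hrest : PySem.List.slice (cur ++ ('|' :: '|' :: r2))
                (some (((cur.length : Nat) : Int) + ((['|','|'] : List Char).length : Int))) none = r2 := by
              rw [PySem.List.slice_from _ (by omega), hlen2]
              simpa using List.drop_length_add_append 2 cur ('|' :: '|' :: r2)
            simp only [hseg, hrest]
            have hc1 : ('|' :: '|' :: r2).take 2 = ['|', '|'] := rfl
            rw [parseChainGoA, if_pos (Or.inr hc1), if_neg (by simp : ¬ ('|' :: '|' :: r2).take 2 = ['&', '&'])]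
            have hpush : (String.ofList ['|','|']) = "||" := rfl
            simp only [hpush, List.drop_succ_cons, List.drop_zero]
            exact ih r2 (by simp at hlen; omega) [] _ (inv_nil r2)
        by_cases hp : c = '|'
        · -- "|" case
          subst hp
          have hmin : ∀ op ∈ pvOps, ∀ j < cur.length,
              ¬ op <+: (cur ++ ('|' :: r)).drop j := hinv
          have hf1 := (inv_find_case cur _ ['&','&'] (by simp) (hmin _ (by simp [pvOps]))).2 (by simp [List.cons_prefix_cons])
          have hf2 := (inv_find_case cur _ ['|','|'] (by simp) (hmin _ (by simp [pvOps]))).2 (by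
            intro hpre
            obtain ⟨-, h2⟩ := List.cons_prefix_cons.mp hpre
            obtain ⟨t, ht⟩ := h2
            subst ht
            simp at hO)
          have hf3 := (inv_find_case cur _ [';'] (by simp) (hmin _ (by simp [pvOps]))).2 (by simp [List.cons_prefix_cons])
          have hf4 := (inv_find_case cur _ ['|'] (by simp) (hmin _ (by simp [pvOps]))).1 ⟨r, rfl⟩
          have hbest := pvBest_pipe1 _ cur.length hf1 hf2 hf3 hf4
          rw [goB_some parts _ _ _ hbest]
          have hseg : PySem.List.slice (cur ++ ('|' :: r)) none
              (some ((cur.length : Nat) : Int)) = cur := by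
            rw [PySem.List.slice_to _ (by omega)]
            simp
          have hlen2 : (((cur.length : Nat) : Int) + ((['|'] : List Char).length : Int)).toNat
              = cur.length + 1 := by
            simp only [List.length_cons, List.length_nil]
            omega
          have hrest : PySem.List.slice (cur ++ ('|' :: r))
              (some (((cur.length : Nat) : Int) + ((['|'] : List Char).length : Int))) none = r := by
            rw [PySem.List.slice_from _ (by omega), hlen2]
            simpa using List.drop_length_add_append 1 cur ('|' :: r)
          simp only [hseg, hrest]
          have hC : ¬ (('|' :: r).take 2 = ['&', '&'] ∨ ('|' :: r).take 2 = ['|', '|']) :=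
            not_or.mpr ⟨hA, hO⟩
          rw [parseChainGoA, if_neg hC, if_pos rfl]
          have hpush : (String.ofList ['|']) = "|" := rfl
          simp only [hpush]
          exact ih r (by simp at hlen; omega) [] _ (inv_nil r)
        by_cases hs : c = ';'
        · -- ";" case
          subst hs
          have hmin : ∀ op ∈ pvOps, ∀ j < cur.length,
              ¬ op <+: (cur ++ (';' :: r)).drop j := hinv
          have hf1 := (inv_find_case cur _ ['&','&'] (by simp) (hmin _ (by simp [pvOps]))).2 (by simp [List.cons_prefix_cons])
          have hf2 := (inv_find_case cur _ ['|','|'] (by simp) (hmin _ (by simp [pvOps]))).2 (by simp [List.cons_prefix_cons])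
          have hf3 := (inv_find_case cur _ [';'] (by simp) (hmin _ (by simp [pvOps]))).1 ⟨r, rfl⟩
          have hf4 := (inv_find_case cur _ ['|'] (by simp) (hmin _ (by simp [pvOps]))).2 (by simp [List.cons_prefix_cons])
          have hbest := pvBest_semi _ cur.length hf1 hf2 hf3 hf4
          rw [goB_some parts _ _ _ hbest]
          have hseg : PySem.List.slice (cur ++ (';' :: r)) none
              (some ((cur.length : Nat) : Int)) = cur := by
            rw [PySem.List.slice_to _ (by omega)]
            simp
          have hlen2 : (((cur.length : Nat) : Int) + (([';'] : List Char).length : Int)).toNat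
              = cur.length + 1 := by
            simp only [List.length_cons, List.length_nil]
            omega
          have hrest : PySem.List.slice (cur ++ (';' :: r))
              (some (((cur.length : Nat) : Int) + (([';'] : List Char).length : Int))) none = r := by
            rw [PySem.List.slice_from _ (by omega), hlen2]
            simpa using List.drop_length_add_append 1 cur (';' :: r)
          simp only [hseg, hrest]
          have hC : ¬ ((';' :: r).take 2 = ['&', '&'] ∨ (';' :: r).take 2 = ['|', '|']) :=
            not_or.mpr ⟨hA, hO⟩
          rw [parseChainGoA, if_neg hC, if_neg hp, if_pos rfl]
          have hpush : (String.ofList [';']) = ";" := rfl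
          simp only [hpush]
          exact ih r (by simp at hlen; omega) [] _ (inv_nil r)
        -- default: ordinary character
        have hstep : parseChainGoA parts cur (c :: r) = parseChainGoA parts (cur ++ [c]) r := by
          have hC : ¬ ((c :: r).take 2 = ['&', '&'] ∨ (c :: r).take 2 = ['|', '|']) :=
            not_or.mpr ⟨hA, hO⟩
          rw [parseChainGoA, if_neg hC, if_neg hp, if_neg hs]
        rw [hstep]
        have := ih r (by simp at hlen; omega) (cur ++ [c]) parts
          (inv_extend cur c r hinv hA hp hs)
        simpa using this

-- ===== VERDICT (by name: the statement is the Claim_ definition above) =====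
theorem parse_chain_py_spec : Claim_equal_parse_chain_py := by
  intro s _
  unfold Spec_parse_chain_py parse_chain_py parse_chain_py_alt
  have := parseChain_main s.toList.length s.toList le_rfl [] []
    (by intro op _ j hj; simp at hj)
  simpa using this
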